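-- pv_equiv track=rewrite | github.com/ASTRAL-Group/LoRe | LoRe-Bench/LoRe-Mono/scripts/lang-phonology-cv-rotation.py | update_word_once
-- ===== SOURCE A (Python) =====
-- def update_word_once(word: str, rotV: dict, rotC: dict) -> str:
--     """
--     Apply one synchronous CV-rotation step to the given word.
--
--     Rules:
--       - Vowels rotate on the vowel wheel (rotV).
--       - Consonants rotate on the consonant wheel (rotC).
--       - Case is preserved (A -> E, b -> c, etc.).
--       - Non-letters (digits, hyphens, spaces, punctuation) are left unchanged.
--       - Update is synchronous: every character is replaced based on the *original* w_t.
--     """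
--     out_chars = []
--     for ch in word:
--         low = ch.lower()
--         if low in rotV:
--             nxt = rotV[low]
--             out_chars.append(nxt.upper() if ch.isupper() else nxt)
--         elif low in rotC:
--             nxt = rotC[low]
--             out_chars.append(nxt.upper() if ch.isupper() else nxt)
--         else:
--             out_chars.append(ch)  # leave non-letters or out-of-inventory chars as-is
--     return "".join(out_chars)
-- ===== SOURCE B (Python) =====
-- def update_word_once(word: str, rotV: dict, rotC: dict) -> str:
--     # Build a str.translate table once: vowel entries take precedence over
--     # consonant entries; each lowercase key also installs its uppercase variant.
--     table = {}
--     for k, v in list(rotV.items()) + list(rotC.items()):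
--         if len(k) == 1 and not k.isupper() and ord(k) not in table:
--             table[ord(k)] = v
--             if k.islower():
--                 table[ord(k.upper())] = v.upper()
--     return word.translate(table)
-- ===== Notes on version B (the rewrite author's own statement) =====
-- stated objective: idiomatic
-- what changed: B precomputes a str.translate table once (vowel entries take precedence over consonant entries, each lowercase key also installing its uppercase variant) and applies it in a single translate pass, instead of A's per-character lower/membership branch cascade.
import Mathlib
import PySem

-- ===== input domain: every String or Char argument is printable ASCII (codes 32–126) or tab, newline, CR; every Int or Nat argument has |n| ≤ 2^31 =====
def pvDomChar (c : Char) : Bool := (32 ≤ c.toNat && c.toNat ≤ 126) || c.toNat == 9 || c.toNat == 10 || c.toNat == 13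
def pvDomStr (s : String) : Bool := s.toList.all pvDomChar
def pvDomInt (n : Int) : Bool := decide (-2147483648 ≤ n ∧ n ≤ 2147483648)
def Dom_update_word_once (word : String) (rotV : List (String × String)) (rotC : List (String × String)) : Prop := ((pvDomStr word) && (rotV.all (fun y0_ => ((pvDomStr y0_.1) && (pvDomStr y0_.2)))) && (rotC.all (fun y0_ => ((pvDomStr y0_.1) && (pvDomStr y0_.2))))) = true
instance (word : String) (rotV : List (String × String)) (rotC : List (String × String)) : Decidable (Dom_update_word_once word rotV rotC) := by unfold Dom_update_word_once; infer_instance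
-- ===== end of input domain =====

-- B replaces A's per-character branch cascade by a precomputed translation table
-- (vowel entries take precedence, both case variants installed up front) applied
-- in one translate-style pass; objective: idiomatic (str.translate).

-- ===== PORT A =====
def update_word_once (word : String) (rotV : List (String × String)) (rotC : List (String × String)) : String :=
  let out_chars : List String := word.toList.foldl (fun acc ch =>
    let low := PySem.Str.lower (String.ofList [ch])
    match (PySem.Dict.mk rotV).get? low with
    | some nxt => acc ++ [if PySem.Chars.isupper ch then PySem.Str.upper nxt else nxt]
    | none =>
      match (PySem.Dict.mk rotC).get? low with
      | some nxt => acc ++ [if PySem.Chars.isupper ch then PySem.Str.upper nxt else nxt]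
      | none => acc ++ [String.ofList [ch]]) []
  PySem.Str.join "" out_chars

-- ===== PORT B =====
-- one loop step of Source B's table build: a usable key (single char, not uppercase,
-- not already claimed) installs its entry, a lowercase key also its uppercase variant
def pvTableStep (t : PySem.Dict Char String) (kv : String × String) : PySem.Dict Char String :=
  match kv.1.toList with
  | [d] =>
    if PySem.Chars.isupper d || t.contains d then t
    else
      let t' := t.insert d kv.2
      if PySem.Chars.islower d then t'.insert (PySem.Chars.upperChar d) (PySem.Str.upper kv.2)
      else t'
  | _ => t

def update_word_once_alt (word : String) (rotV : List (String × String)) (rotC : List (String × String)) : String :=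
  let table := (rotV ++ rotC).foldl pvTableStep PySem.Dict.empty
  -- word.translate(table), ported by hand: per code point, the table entry if present,
  -- else the character itself (exact here: all table values are strings, no deletions)
  PySem.Str.join "" (word.toList.map (fun c => table.getD c (String.ofList [c])))

-- ===== PRECONDITION & SPEC =====
def Spec_update_word_once (word : String) (rotV : List (String × String)) (rotC : List (String × String)) (out : String) : Prop := out = update_word_once_alt word rotV rotC
instance (word : String) (rotV : List (String × String)) (rotC : List (String × String)) (out : String) : Decidable (Spec_update_word_once word rotV rotC out) := by unfold Spec_update_word_once; infer_instance

-- ===== CLAIM (what is proved, stated in full; the proofs are below) =====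
def Claim_equal_update_word_once : Prop := ∀ (word : String) (rotV : List (String × String)) (rotC : List (String × String)), Dom_update_word_once word rotV rotC → Spec_update_word_once word rotV rotC (update_word_once word rotV rotC)

-- ===== LEMMAS AND PROOFS =====

-- A's per-character replacement, extracted from its loop body
def pvAChar (rotV rotC : List (String × String)) (ch : Char) : String :=
  match (PySem.Dict.mk rotV).get? (PySem.Str.lower (String.ofList [ch])) with
  | some nxt => if PySem.Chars.isupper ch then PySem.Str.upper nxt else nxt
  | none =>
    match (PySem.Dict.mk rotC).get? (PySem.Str.lower (String.ofList [ch])) with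
    | some nxt => if PySem.Chars.isupper ch then PySem.Str.upper nxt else nxt
    | none => String.ofList [ch]

theorem pv_charLe (a b : Char) : a ≤ b ↔ a.toNat ≤ b.toNat := ge_iff_le

theorem pv_isupper_iff (c : Char) : PySem.Chars.isupper c = true ↔ 65 ≤ c.toNat ∧ c.toNat ≤ 90 := by
  unfold PySem.Chars.isupper
  rw [Bool.and_eq_true, decide_eq_true_eq, decide_eq_true_eq, pv_charLe, pv_charLe,
    show ('A').toNat = 65 from by decide, show ('Z').toNat = 90 from by decide]

theorem pv_islower_iff (c : Char) : PySem.Chars.islower c = true ↔ 97 ≤ c.toNat ∧ c.toNat ≤ 122 := by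
  unfold PySem.Chars.islower
  rw [Bool.and_eq_true, decide_eq_true_eq, decide_eq_true_eq, pv_charLe, pv_charLe,
    show ('a').toNat = 97 from by decide, show ('z').toNat = 122 from by decide]

theorem pv_toNat_inj {a b : Char} (h : a.toNat = b.toNat) : a = b := by
  rw [← Char.ofNat_toNat a, ← Char.ofNat_toNat b, h]

theorem pv_toNat_lowerChar {c : Char} (h : PySem.Chars.isupper c = true) :
    (PySem.Chars.lowerChar c).toNat = c.toNat + 32 := by
  have hb := (pv_isupper_iff c).mp h
  unfold PySem.Chars.lowerChar
  rw [if_pos h, Char.toNat_ofNat, if_pos (Or.inl (by omega))]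

theorem pv_toNat_upperChar {c : Char} (h : PySem.Chars.islower c = true) :
    (PySem.Chars.upperChar c).toNat = c.toNat - 32 := by
  have hb := (pv_islower_iff c).mp h
  unfold PySem.Chars.upperChar
  rw [if_pos h, Char.toNat_ofNat, if_pos (Or.inl (by omega))]

theorem pv_lowerChar_of_not_upper {c : Char} (h : PySem.Chars.isupper c = false) :
    PySem.Chars.lowerChar c = c := by
  unfold PySem.Chars.lowerChar
  rw [h]
  simp

theorem pv_lowerChar_not_upper (c : Char) : PySem.Chars.isupper (PySem.Chars.lowerChar c) = false := by
  by_cases h : PySem.Chars.isupper c = true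
  · rw [← Bool.not_eq_true]
    intro hx
    have h1 := pv_toNat_lowerChar h
    have hb := (pv_isupper_iff c).mp h
    have hb2 := (pv_isupper_iff _).mp hx
    omega
  · rw [Bool.not_eq_true] at h
    rw [pv_lowerChar_of_not_upper h]
    exact h

theorem pv_islower_lowerChar {c : Char} (h : PySem.Chars.isupper c = true) :
    PySem.Chars.islower (PySem.Chars.lowerChar c) = true := by
  have h1 := pv_toNat_lowerChar h
  have hb := (pv_isupper_iff c).mp h
  rw [pv_islower_iff, h1]
  omega

theorem pv_upperChar_lowerChar {c : Char} (h : PySem.Chars.isupper c = true) :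
    PySem.Chars.upperChar (PySem.Chars.lowerChar c) = c := by
  apply pv_toNat_inj
  rw [pv_toNat_upperChar (pv_islower_lowerChar h), pv_toNat_lowerChar h]
  omega

theorem pv_not_upper_of_lower {c : Char} (h : PySem.Chars.islower c = true) :
    PySem.Chars.isupper c = false := by
  have hb := (pv_islower_iff c).mp h
  rw [← Bool.not_eq_true, pv_isupper_iff]
  omega

theorem pv_isupper_upperChar {c : Char} (h : PySem.Chars.islower c = true) :
    PySem.Chars.isupper (PySem.Chars.upperChar c) = true := by
  have h1 := pv_toNat_upperChar h
  have hb := (pv_islower_iff c).mp h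
  rw [pv_isupper_iff, h1]
  omega

theorem pv_lowerChar_upperChar {c : Char} (h : PySem.Chars.islower c = true) :
    PySem.Chars.lowerChar (PySem.Chars.upperChar c) = c := by
  apply pv_toNat_inj
  have h2 := pv_toNat_upperChar h
  have hb := (pv_islower_iff c).mp h
  rw [pv_toNat_lowerChar (pv_isupper_upperChar h), h2]
  omega

theorem pv_upperChar_ne_self {c : Char} (h : PySem.Chars.islower c = true) :
    PySem.Chars.upperChar c ≠ c := by
  intro he
  have h1 := pv_isupper_upperChar h
  rw [he, pv_not_upper_of_lower h] at h1
  exact Bool.false_ne_true h1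

theorem pv_lower_singleton (c : Char) :
    PySem.Str.lower (String.ofList [c]) = String.ofList [PySem.Chars.lowerChar c] := by
  simp [PySem.Str.lower, PySem.Chars.lower]

theorem pv_ofList_singleton_eq {k : String} {c : Char} :
    (k == String.ofList [c]) = true ↔ k.toList = [c] := by
  constructor
  · intro h
    rw [beq_iff_eq.mp h]
    simp
  · intro h
    have hk : k = String.ofList [c] := by
      rw [← h]
      exact (String.ofList_toList (s := k)).symm
    simp [hk]

-- rewrite rules for the four shapes of a table-build step
theorem pvTableStep_nil {t : PySem.Dict Char String} {kv : String × String}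
    (hk : kv.1.toList = []) : pvTableStep t kv = t := by
  unfold pvTableStep
  rw [hk]

theorem pvTableStep_long {t : PySem.Dict Char String} {kv : String × String} {d e : Char}
    {l : List Char} (hk : kv.1.toList = d :: e :: l) : pvTableStep t kv = t := by
  unfold pvTableStep
  rw [hk]

theorem pvTableStep_skip {t : PySem.Dict Char String} {kv : String × String} {d : Char}
    (hk : kv.1.toList = [d]) (h : (PySem.Chars.isupper d || t.contains d) = true) :
    pvTableStep t kv = t := by
  unfold pvTableStep
  rw [hk]
  simp [h]

theorem pvTableStep_lower {t : PySem.Dict Char String} {kv : String × String} {d : Char}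
    (hk : kv.1.toList = [d]) (hu : PySem.Chars.isupper d = false) (hc : t.contains d = false)
    (hl : PySem.Chars.islower d = true) :
    pvTableStep t kv = (t.insert d kv.2).insert (PySem.Chars.upperChar d) (PySem.Str.upper kv.2) := by
  unfold pvTableStep
  rw [hk]
  simp [hu, hc, hl]

theorem pvTableStep_plain {t : PySem.Dict Char String} {kv : String × String} {d : Char}
    (hk : kv.1.toList = [d]) (hu : PySem.Chars.isupper d = false) (hc : t.contains d = false)
    (hl : PySem.Chars.islower d = false) :
    pvTableStep t kv = t.insert d kv.2 := by
  unfold pvTableStep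
  rw [hk]
  simp [hu, hc, hl]

-- A's loop builds exactly the per-character map
theorem pv_A_loop (rotV rotC : List (String × String)) (l : List Char) (acc : List String) :
    l.foldl (fun acc ch =>
      let low := PySem.Str.lower (String.ofList [ch])
      match (PySem.Dict.mk rotV).get? low with
      | some nxt => acc ++ [if PySem.Chars.isupper ch then PySem.Str.upper nxt else nxt]
      | none =>
        match (PySem.Dict.mk rotC).get? low with
        | some nxt => acc ++ [if PySem.Chars.isupper ch then PySem.Str.upper nxt else nxt]
        | none => acc ++ [String.ofList [ch]]) acc = acc ++ l.map (pvAChar rotV rotC) := by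
  induction l generalizing acc with
  | nil => simp
  | cons ch l ih =>
    simp only [List.foldl_cons, List.map_cons]
    rw [ih]
    have hstep : ∀ a : List String,
        (let low := PySem.Str.lower (String.ofList [ch])
         match (PySem.Dict.mk rotV).get? low with
         | some nxt => a ++ [if PySem.Chars.isupper ch then PySem.Str.upper nxt else nxt]
         | none =>
           match (PySem.Dict.mk rotC).get? low with
           | some nxt => a ++ [if PySem.Chars.isupper ch then PySem.Str.upper nxt else nxt]
           | none => a ++ [String.ofList [ch]]) = a ++ [pvAChar rotV rotC ch] := by
      intro a
      show (match (PySem.Dict.mk rotV).get? (PySem.Str.lower (String.ofList [ch])) with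
        | some nxt => a ++ [if PySem.Chars.isupper ch then PySem.Str.upper nxt else nxt]
        | none =>
          match (PySem.Dict.mk rotC).get? (PySem.Str.lower (String.ofList [ch])) with
          | some nxt => a ++ [if PySem.Chars.isupper ch then PySem.Str.upper nxt else nxt]
          | none => a ++ [String.ofList [ch]]) = a ++ [pvAChar rotV rotC ch]
      unfold pvAChar
      cases (PySem.Dict.mk rotV).get? (PySem.Str.lower (String.ofList [ch])) with
      | some nxt => rfl
      | none => cases (PySem.Dict.mk rotC).get? (PySem.Str.lower (String.ofList [ch])) <;> rfl
    rw [hstep, List.append_assoc]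
    rfl

-- invariant of the table build: uppercase slots are exactly the upper images of their lowercase siblings
def pvInv (t : PySem.Dict Char String) : Prop :=
  ∀ d : Char, PySem.Chars.islower d = true →
    t.get? (PySem.Chars.upperChar d) = (t.get? d).map PySem.Str.upper

theorem pv_inv_empty : pvInv PySem.Dict.empty := by
  intro d _
  simp [PySem.Dict.get?_empty]

theorem pv_inv_step {t : PySem.Dict Char String} (h : pvInv t) (kv : String × String) :
    pvInv (pvTableStep t kv) := by
  cases hk : kv.1.toList with
  | nil => rw [pvTableStep_nil hk]; exact h
  | cons d tl =>
    cases tl with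
    | cons _ _ => rw [pvTableStep_long hk]; exact h
    | nil =>
      by_cases hu : (PySem.Chars.isupper d || t.contains d) = true
      · rw [pvTableStep_skip hk hu]; exact h
      · simp only [Bool.or_eq_true, not_or, Bool.not_eq_true] at hu
        obtain ⟨hdu, hcon⟩ := hu
        by_cases hl : PySem.Chars.islower d = true
        · rw [pvTableStep_lower hk hdu hcon hl]
          intro e he
          by_cases hed : e = d
          · subst hed
            rw [PySem.Dict.get?_insert_self,
              PySem.Dict.get?_insert_of_ne _ _ (pv_upperChar_ne_self he).symm,
              PySem.Dict.get?_insert_self]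
            rfl
          · have h1 : PySem.Chars.upperChar e ≠ PySem.Chars.upperChar d := by
              intro hx
              exact hed (by rw [← pv_lowerChar_upperChar he, hx, pv_lowerChar_upperChar hl])
            have h2 : PySem.Chars.upperChar e ≠ d := by
              intro hx
              have hq := pv_isupper_upperChar he
              rw [hx, hdu] at hq
              exact Bool.false_ne_true hq
            have h3 : e ≠ PySem.Chars.upperChar d := by
              intro hx
              have hq := pv_isupper_upperChar hl
              rw [← hx, pv_not_upper_of_lower he] at hq
              exact Bool.false_ne_true hq
            rw [PySem.Dict.get?_insert_of_ne _ _ h1, PySem.Dict.get?_insert_of_ne _ _ h2,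
              PySem.Dict.get?_insert_of_ne _ _ h3, PySem.Dict.get?_insert_of_ne _ _ hed]
            exact h e he
        · rw [Bool.not_eq_true] at hl
          rw [pvTableStep_plain hk hdu hcon hl]
          intro e he
          have h2 : PySem.Chars.upperChar e ≠ d := by
            intro hx
            have hq := pv_isupper_upperChar he
            rw [hx, hdu] at hq
            exact Bool.false_ne_true hq
          have h3 : e ≠ d := by
            intro hx
            rw [hx, hl] at he
            exact Bool.false_ne_true he
          rw [PySem.Dict.get?_insert_of_ne _ _ h2, PySem.Dict.get?_insert_of_ne _ _ h3]
          exact h e he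

-- what the finished table answers at any character, in terms of a first-match lookup
theorem pv_table_get (ps : List (String × String)) (t : PySem.Dict Char String)
    (hInv : pvInv t) (c : Char) :
    (ps.foldl pvTableStep t).get? c =
      (t.get? c).or (Option.map (fun v => if PySem.Chars.isupper c then PySem.Str.upper v else v)
        ((PySem.Dict.mk ps).get? (String.ofList [PySem.Chars.lowerChar c]))) := by
  induction ps generalizing t with
  | nil => simp [PySem.Dict.get?]
  | cons kv rest ih =>
    obtain ⟨k, v⟩ := kv
    rw [List.foldl_cons, PySem.Dict.get?_mk_cons]
    cases hk : (Prod.mk k v).1.toList with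
    | nil =>
      have hne : (k == String.ofList [PySem.Chars.lowerChar c]) = false := by
        rw [← Bool.not_eq_true]
        intro hx
        rw [pv_ofList_singleton_eq.mp hx] at hk
        cases hk
      rw [hne, if_neg (by simp), pvTableStep_nil hk]
      exact ih t hInv
    | cons d tl =>
      cases tl with
      | cons _ _ =>
        have hne : (k == String.ofList [PySem.Chars.lowerChar c]) = false := by
          rw [← Bool.not_eq_true]
          intro hx
          rw [pv_ofList_singleton_eq.mp hx] at hk
          cases hk
        rw [hne, if_neg (by simp), pvTableStep_long hk]
        exact ih t hInv
      | nil =>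
        by_cases hmatch : (k == String.ofList [PySem.Chars.lowerChar c]) = true
        · -- this pair's key is exactly lowerChar c
          have hd : d = PySem.Chars.lowerChar c := by
            have hq := pv_ofList_singleton_eq.mp hmatch
            rw [hk] at hq
            exact (List.cons.injEq _ _ _ _).mp hq |>.1
          have hdu : PySem.Chars.isupper d = false := by
            rw [hd]
            exact pv_lowerChar_not_upper c
          rw [hmatch, if_pos rfl]
          by_cases hcon : t.contains d = true
          · -- already claimed: the table keeps its entry, which is some
            rw [pvTableStep_skip hk (by rw [hcon, Bool.or_true])]
            obtain ⟨w, hw⟩ : ∃ w, t.get? d = some w := by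
              have hq := PySem.Dict.contains_eq_isSome_get? (d := t) (k := d)
              rw [hcon] at hq
              exact Option.isSome_iff_exists.mp hq.symm
            obtain ⟨w', hw'⟩ : ∃ w', t.get? c = some w' := by
              by_cases hcu : PySem.Chars.isupper c = true
              · refine ⟨PySem.Str.upper w, ?_⟩
                have hq := hInv d (by rw [hd]; exact pv_islower_lowerChar hcu)
                rw [hd, pv_upperChar_lowerChar hcu] at hq
                rw [hq, ← hd, hw]
                rfl
              · have hcd : c = d := by
                  rw [Bool.not_eq_true] at hcu
                  rw [hd, pv_lowerChar_of_not_upper hcu]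
                exact ⟨w, by rw [hcd, hw]⟩
            rw [ih t hInv, hw']
            rfl
          · -- fresh key: the inserts answer for c
            rw [Bool.not_eq_true] at hcon
            have ht : t.get? c = none := by
              have hnd : t.get? d = none := by
                have hq := PySem.Dict.contains_eq_isSome_get? (d := t) (k := d)
                rw [hcon] at hq
                cases hx : t.get? d with
                | none => rfl
                | some w => rw [hx] at hq; cases hq
              by_cases hcu : PySem.Chars.isupper c = true
              · have hq := hInv d (by rw [hd]; exact pv_islower_lowerChar hcu)
                rw [hd, pv_upperChar_lowerChar hcu] at hq
                rw [hq, ← hd, hnd]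
                rfl
              · have hcd : c = d := by
                  rw [Bool.not_eq_true] at hcu
                  rw [hd, pv_lowerChar_of_not_upper hcu]
                rw [hcd, hnd]
            by_cases hl : PySem.Chars.islower d = true
            · rw [pvTableStep_lower hk hdu hcon hl]
              have hInv2 : pvInv ((t.insert d v).insert (PySem.Chars.upperChar d) (PySem.Str.upper v)) := by
                have hq := pv_inv_step hInv (k, v)
                rw [pvTableStep_lower hk hdu hcon hl] at hq
                exact hq
              rw [ih _ hInv2]
              have hget : ((t.insert d v).insert (PySem.Chars.upperChar d) (PySem.Str.upper v)).get? c
                  = some (if PySem.Chars.isupper c then PySem.Str.upper v else v) := by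
                by_cases hcu : PySem.Chars.isupper c = true
                · have hcud : c = PySem.Chars.upperChar d := by
                    rw [hd, pv_upperChar_lowerChar hcu]
                  have hval : (if PySem.Chars.isupper c then PySem.Str.upper v else v) = PySem.Str.upper v := by
                    rw [if_pos hcu]
                  rw [hval, hcud, PySem.Dict.get?_insert_self]
                · have hcd : c = d := by
                    rw [Bool.not_eq_true] at hcu
                    rw [hd, pv_lowerChar_of_not_upper hcu]
                  have hne : c ≠ PySem.Chars.upperChar d := by
                    rw [hcd]
                    exact (pv_upperChar_ne_self hl).symm
                  rw [PySem.Dict.get?_insert_of_ne _ _ hne, hcd, PySem.Dict.get?_insert_self,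
                    if_neg (by rw [← hcd]; exact hcu)]
              rw [hget, ht]
              rfl
            · rw [Bool.not_eq_true] at hl
              rw [pvTableStep_plain hk hdu hcon hl]
              have hcu : PySem.Chars.isupper c = false := by
                rw [← Bool.not_eq_true]
                intro hx
                have hq := pv_islower_lowerChar hx
                rw [← hd, hl] at hq
                exact Bool.false_ne_true hq
              have hcd : c = d := by
                rw [hd, pv_lowerChar_of_not_upper hcu]
              have hInv2 : pvInv (t.insert d v) := by
                have hq := pv_inv_step hInv (k, v)
                rw [pvTableStep_plain hk hdu hcon hl] at hq
                exact hq
              rw [ih _ hInv2, ht, Option.none_or]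
              have hins : (t.insert d v).get? c = some v := by
                rw [hcd, PySem.Dict.get?_insert_self]
              rw [hins]
              simp [hcu]
        · -- key does not match lowerChar c: the step leaves slot c unchanged
          rw [Bool.not_eq_true] at hmatch
          rw [hmatch, if_neg (by simp)]
          have hdne : d ≠ PySem.Chars.lowerChar c := by
            intro hx
            have hq : (k == String.ofList [PySem.Chars.lowerChar c]) = true :=
              pv_ofList_singleton_eq.mpr (by rw [hk, hx])
            rw [hmatch] at hq
            exact Bool.false_ne_true hq
          by_cases hu : (PySem.Chars.isupper d || t.contains d) = true
          · rw [pvTableStep_skip hk hu]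
            exact ih t hInv
          · simp only [Bool.or_eq_true, not_or, Bool.not_eq_true] at hu
            obtain ⟨hdu, hcon⟩ := hu
            have hcd : c ≠ d := by
              intro hx
              apply hdne
              by_cases hcu : PySem.Chars.isupper c = true
              · rw [← hx, hcu] at hdu
                cases hdu
              · rw [Bool.not_eq_true] at hcu
                rw [← hx, pv_lowerChar_of_not_upper hcu]
            by_cases hl : PySem.Chars.islower d = true
            · rw [pvTableStep_lower hk hdu hcon hl]
              have hcup : c ≠ PySem.Chars.upperChar d := by
                intro hx
                apply hdne
                have hcu : PySem.Chars.isupper c = true := by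
                  rw [hx]
                  exact pv_isupper_upperChar hl
                rw [← pv_lowerChar_upperChar hl, ← hx]
              have hInv2 : pvInv ((t.insert d v).insert (PySem.Chars.upperChar d) (PySem.Str.upper v)) := by
                have hq := pv_inv_step hInv (k, v)
                rw [pvTableStep_lower hk hdu hcon hl] at hq
                exact hq
              rw [ih _ hInv2, PySem.Dict.get?_insert_of_ne _ _ hcup,
                PySem.Dict.get?_insert_of_ne _ _ hcd]
            · rw [Bool.not_eq_true] at hl
              rw [pvTableStep_plain hk hdu hcon hl]
              have hInv2 : pvInv (t.insert d v) := by
                have hq := pv_inv_step hInv (k, v)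
                rw [pvTableStep_plain hk hdu hcon hl] at hq
                exact hq
              rw [ih _ hInv2, PySem.Dict.get?_insert_of_ne _ _ hcd]

-- first-match lookup splits over the concatenated key list
theorem pv_mk_append (rotV rotC : List (String × String)) (k : String) :
    (PySem.Dict.mk (rotV ++ rotC)).get? k = ((PySem.Dict.mk rotV).get? k).or ((PySem.Dict.mk rotC).get? k) := by
  simp only [PySem.Dict.get?, List.find?_append]
  cases List.find? (fun p => p.1 == k) rotV <;> simp

-- per-character agreement of the two programs
theorem pv_char_eq (rotV rotC : List (String × String)) (c : Char) :
    ((rotV ++ rotC).foldl pvTableStep PySem.Dict.empty).getD c (String.ofList [c]) =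
      pvAChar rotV rotC c := by
  rw [PySem.Dict.getD_eq_get?_getD, pv_table_get _ _ pv_inv_empty c, PySem.Dict.get?_empty,
    Option.none_or, pv_mk_append]
  unfold pvAChar
  rw [pv_lower_singleton]
  cases (PySem.Dict.mk rotV).get? (String.ofList [PySem.Chars.lowerChar c]) with
  | some nxt => rfl
  | none =>
    cases (PySem.Dict.mk rotC).get? (String.ofList [PySem.Chars.lowerChar c]) <;> rfl

-- ===== VERDICT (by name: the statement is the Claim_ definition above) =====
theorem update_word_once_spec : Claim_equal_update_word_once := by
  unfold Claim_equal_update_word_once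
  intro word rotV rotC _
  show update_word_once word rotV rotC = update_word_once_alt word rotV rotC
  unfold update_word_once update_word_once_alt
  rw [pv_A_loop rotV rotC word.toList [], List.nil_append]
  exact congrArg (PySem.Str.join "") (List.map_congr_left (fun c _ => (pv_char_eq rotV rotC c).symm))
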